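-- pv_equiv track=rewrite | github.com/DavDonger/OK | test.py | generate_city_names
-- ===== SOURCE A (Python) =====
-- def generate_city_names(num_cities):
--         names = []
--         for i in range(1, num_cities + 1):
--             name = ""
--             while i > 0:
--                 i -= 1
--                 name = chr(97 + i % 26) + name  # 97 is ASCII for 'a'
--                 i //= 26
--             names.append(name)
--         return names
-- ===== SOURCE B (Python) =====
-- def succ_rev(rev):
--     # successor of a bijective base-26 numeral, digits least-significant first
--     if not rev:
--         return ['a']
--     if rev[0] != 'z':
--         return [chr(ord(rev[0]) + 1)] + rev[1:]
--     return ['a'] + succ_rev(rev[1:])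
--
--
-- def generate_city_names(num_cities):
--     names = []
--     rev = []
--     for _ in range(1, num_cities + 1):
--         rev = succ_rev(rev)
--         names.append("".join(reversed(rev)))
--     return names
-- ===== Notes on version B (the rewrite author's own statement) =====
-- stated objective: alternative
-- what changed: Replaces per-index base-26 conversion (divmod digit extraction for each i) with an odometer: a single running numeral, kept as a least-significant-first char list, is advanced by a recursive bijective-base-26 successor function once per name, so no division is performed at all.
import Mathlib
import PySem

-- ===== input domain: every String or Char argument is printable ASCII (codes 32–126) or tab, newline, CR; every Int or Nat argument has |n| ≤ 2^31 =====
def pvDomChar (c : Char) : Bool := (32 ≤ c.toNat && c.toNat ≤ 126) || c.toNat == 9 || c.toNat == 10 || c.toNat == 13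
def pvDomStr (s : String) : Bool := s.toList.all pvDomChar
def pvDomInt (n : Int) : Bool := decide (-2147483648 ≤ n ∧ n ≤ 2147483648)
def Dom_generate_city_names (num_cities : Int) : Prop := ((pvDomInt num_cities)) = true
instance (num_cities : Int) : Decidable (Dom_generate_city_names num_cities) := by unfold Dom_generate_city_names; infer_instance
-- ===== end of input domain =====

-- B replaces A's per-index divmod digit extraction by an odometer: one running
-- least-significant-first numeral advanced by a recursive bijective-base-26
-- successor, no division at all (alternative decomposition; same cost).


-- ===== PORT A =====
-- inner 'while i > 0' loop: i -= 1; name = chr(97 + i % 26) + name; i //= 26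
def pvALoop (i : Int) (name : String) : String :=
  if _h : i > 0 then
    pvALoop (PySem.Int.floordiv (i - 1) 26)
      (String.ofList [Char.ofNat (97 + (PySem.Int.mod (i - 1) 26)).toNat] ++ name)
  else name
termination_by i.toNat
decreasing_by
  rw [PySem.Int.floordiv_eq_ediv_of_pos (by norm_num : (0:Int) < 26)]
  omega

def generate_city_names (num_cities : Int) : List String :=
  (PySem.List.pyRange 1 (num_cities + 1) 1).foldl
    (fun names i => names ++ [pvALoop i ""]) []

-- ===== PORT B =====
-- succ_rev: bijective base-26 successor on a least-significant-first char list
def pvSuccRev : List Char → List Char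
  | [] => ['a']
  | c :: rest => if c ≠ 'z' then Char.ofNat (c.toNat + 1) :: rest else 'a' :: pvSuccRev rest

def generate_city_names_alt (num_cities : Int) : List String :=
  ((PySem.List.pyRange 1 (num_cities + 1) 1).foldl
    (fun (st : List String × List Char) _ =>
      let rev := pvSuccRev st.2
      (st.1 ++ [String.ofList rev.reverse], rev))
    (([] : List String), ([] : List Char))).1

-- ===== PRECONDITION & SPEC =====
def Spec_generate_city_names (num_cities : Int) (out : List String) : Prop := out = generate_city_names_alt num_cities
instance (num_cities : Int) (out : List String) : Decidable (Spec_generate_city_names num_cities out) := by unfold Spec_generate_city_names; infer_instance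

-- ===== CLAIM (what is proved, stated in full; the proofs are below) =====
def Claim_equal_generate_city_names : Prop := ∀ (num_cities : Int), Dom_generate_city_names num_cities → Spec_generate_city_names num_cities (generate_city_names num_cities)

-- ===== LEMMAS AND PROOFS =====

-- the digit chain of i, least-significant first (abstract description of both programs)
def pvDigRev (i : Int) : List Char :=
  if _h : i ≤ 0 then []
  else Char.ofNat (97 + (PySem.Int.mod (i - 1) 26)).toNat :: pvDigRev (PySem.Int.floordiv (i - 1) 26)
termination_by i.toNat
decreasing_by
  rw [PySem.Int.floordiv_eq_ediv_of_pos (by norm_num : (0:Int) < 26)]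
  omega

-- A's prepend loop produces the reversed digit chain
theorem pvALoop_eq_digRev (i : Int) (name : String) :
    pvALoop i name = String.ofList (pvDigRev i).reverse ++ name := by
  rw [pvALoop, pvDigRev]
  by_cases h : i > 0
  · rw [dif_pos h, dif_neg (not_le.mpr h), pvALoop_eq_digRev]
    rw [← String.append_assoc, ← String.ofList_append]
    simp
  · rw [dif_neg h, dif_pos (not_lt.mp h)]
    simp
termination_by i.toNat
decreasing_by
  rw [PySem.Int.floordiv_eq_ediv_of_pos (by norm_num : (0:Int) < 26)]
  omega

-- B's successor steps the digit chain
theorem pvSuccRev_digRev (i : Int) (hi : 0 ≤ i) :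
    pvSuccRev (pvDigRev i) = pvDigRev (i + 1) := by
  rw [pvDigRev]
  by_cases h : i ≤ 0
  · have h0 : i = 0 := le_antisymm h hi
    subst h0
    rw [dif_pos le_rfl]
    conv_rhs => rw [pvDigRev]
    norm_num [PySem.Int.mod_eq_emod_of_pos (by norm_num : (0:Int) < 26),
              PySem.Int.floordiv_eq_ediv_of_pos (by norm_num : (0:Int) < 26)]
    conv_rhs => rw [pvDigRev]
    rw [dif_pos (le_rfl : (0:Int) ≤ 0)]
    rfl
  · rw [dif_neg h]
    rw [PySem.Int.mod_eq_emod_of_pos (by norm_num : (0:Int) < 26),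
        PySem.Int.floordiv_eq_ediv_of_pos (by norm_num : (0:Int) < 26)]
    have hr0 : 0 ≤ (i - 1) % 26 := Int.emod_nonneg _ (by norm_num)
    have hr1 : (i - 1) % 26 < 26 := Int.emod_lt_of_pos _ (by norm_num)
    have hv : (97 + (i - 1) % 26).toNat < 55296 := by omega
    rw [pvSuccRev]
    by_cases hz : (i - 1) % 26 = 25
    · -- last digit is 'z': carry
      have hcz : Char.ofNat (97 + (i - 1) % 26).toNat = 'z' := by
        rw [hz]; rfl
      rw [hcz]
      simp only [ne_eq, not_true_eq_false, if_false]
      have hq : 0 ≤ (i - 1) / 26 := Int.ediv_nonneg (by omega) (by norm_num)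
      rw [pvSuccRev_digRev ((i - 1) / 26) hq]
      conv_rhs => rw [pvDigRev]
      rw [dif_neg (by omega : ¬ i + 1 ≤ 0)]
      rw [PySem.Int.mod_eq_emod_of_pos (by norm_num : (0:Int) < 26),
          PySem.Int.floordiv_eq_ediv_of_pos (by norm_num : (0:Int) < 26)]
      have h1 : (i + 1 - 1) % 26 = 0 := by omega
      have h2 : (i + 1 - 1) / 26 = (i - 1) / 26 + 1 := by omega
      rw [h1, h2]
      rfl
    · -- last digit below 'z': bump it
      have hcz : Char.ofNat (97 + (i - 1) % 26).toNat ≠ 'z' := by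
        intro hc
        have := congrArg Char.toNat hc
        simp [Char.toNat_ofNat, Nat.isValidChar, hv] at this
        omega
      rw [if_pos hcz]
      conv_rhs => rw [pvDigRev]
      rw [dif_neg (by omega : ¬ i + 1 ≤ 0)]
      rw [PySem.Int.mod_eq_emod_of_pos (by norm_num : (0:Int) < 26),
          PySem.Int.floordiv_eq_ediv_of_pos (by norm_num : (0:Int) < 26)]
      have h1 : (i + 1 - 1) % 26 = (i - 1) % 26 + 1 := by omega
      have h2 : (i + 1 - 1) / 26 = (i - 1) / 26 := by omega
      rw [h1, h2]
      congr 1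
      have ht : (Char.ofNat (97 + (i - 1) % 26).toNat).toNat = (97 + (i - 1) % 26).toNat := by
        simp [Char.toNat_ofNat, Nat.isValidChar, hv]
      rw [ht]
      congr 1
      omega
termination_by i.toNat
decreasing_by omega

-- the fold invariant for B
theorem pvFoldB (n : Nat) :
    ((PySem.List.pyRange 1 ((n : Int) + 1) 1).foldl
      (fun (st : List String × List Char) _ =>
        let rev := pvSuccRev st.2
        (st.1 ++ [String.ofList rev.reverse], rev))
      (([] : List String), ([] : List Char)))
    = ((PySem.List.pyRange 1 ((n : Int) + 1) 1).map (fun i => String.ofList (pvDigRev i).reverse),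
       pvDigRev (n : Int)) := by
  induction n with
  | zero =>
    rw [PySem.List.pyRange_one_eq_nil (by norm_num), pvDigRev]
    simp
  | succ m ih =>
    have hcast : ((m + 1 : Nat) : Int) + 1 = ((m : Int) + 1) + 1 := by push_cast; ring
    rw [hcast, PySem.List.pyRange_one_succ_right (by omega : (1:Int) ≤ (m : Int) + 1)]
    rw [List.foldl_append, List.map_append, ih]
    simp only [List.foldl_cons, List.foldl_nil, List.map_cons, List.map_nil]
    rw [pvSuccRev_digRev (m : Int) (by positivity)]
    have : ((m + 1 : Nat) : Int) = (m : Int) + 1 := by push_cast; ring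
    rw [this]

-- ===== VERDICT (by name: the statement is the Claim_ definition above) =====
theorem generate_city_names_spec : Claim_equal_generate_city_names := by
  intro n _
  unfold Spec_generate_city_names generate_city_names generate_city_names_alt
  by_cases h : n ≤ 0
  · rw [PySem.List.pyRange_one_eq_nil (by omega)]; rfl
  · obtain ⟨m, rfl⟩ : ∃ m : Nat, n = (m : Int) :=
      ⟨n.toNat, (Int.toNat_of_nonneg (by omega)).symm⟩
    rw [pvFoldB m, PySem.List.foldl_append_singleton_eq_map]
    exact List.map_congr_left fun i _ => by rw [pvALoop_eq_digRev]; simp
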